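-- pv_equiv track=rewrite | github.com/adum/robotsrevenge | scripts/generate_levels_v3.py | format_reject_counts
-- ===== SOURCE A (Python) =====
-- REJECT_CODE_ORDER = (
--     "pb",  # program blueprint build failed
--     "mj",  # meaningless jump
--     "ct",  # guided trace failed
--     "ms",  # trace too short
--     "js",  # no jump/sense activity
--     "sb",  # no S true/false split
--     "ux",  # low coverage or dead instructions
--     "dv",  # low direction diversity in hidden solution
--     "sp",  # low route spread
--     "vc",  # low visited-cell count
--     "ne",  # replay did not escape
--     "sr",  # straight-run limit hit
--     "tc",  # immediate turn-cancel pattern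
--     "pl",  # easy short two-direction program exists
--     "np",  # no movement-only path to exit
--     "md",  # min direction types to exit not met
--     "dn",  # density target not feasible
-- )
--
-- def format_reject_counts(reject_counts: dict[str, int]) -> str:
--     if not reject_counts:
--         return "-"
--     parts: list[str] = []
--     seen: set[str] = set()
--     for code in REJECT_CODE_ORDER:
--         count = reject_counts.get(code, 0)
--         if count <= 0:
--             continue
--         parts.append(f"{code}={count}")
--         seen.add(code)
--     for code in sorted(reject_counts):
--         if code in seen:
--             continue
--         count = reject_counts[code]
--         if count <= 0:
--             continue
--         parts.append(f"{code}={count}")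
--     return " ".join(parts) if parts else "-"
-- ===== SOURCE B (Python) =====
-- REJECT_CODE_ORDER = (
--     "pb", "mj", "ct", "ms", "js", "sb", "ux", "dv", "sp", "vc",
--     "ne", "sr", "tc", "pl", "np", "md", "dn",
-- )
--
-- _RANK = {code: i for i, code in enumerate(REJECT_CODE_ORDER)}
--
--
-- def format_reject_counts(reject_counts: dict[str, int]) -> str:
--     n = len(REJECT_CODE_ORDER)
--     chosen = sorted(
--         (code for code, count in reject_counts.items() if count > 0),
--         key=lambda code: (_RANK.get(code, n), code),
--     )
--     parts = [f"{code}={reject_counts[code]}" for code in chosen]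
--     return " ".join(parts) if parts else "-"
-- ===== Notes on version B (the rewrite author's own statement) =====
-- stated objective: alternative
-- what changed: A's two separate scans (a priority pass over REJECT_CODE_ORDER plus a sorted-keys pass guarded by a 'seen' set) are replaced by collecting the positive codes once and sorting them by the composite key (rank in REJECT_CODE_ORDER or len(REJECT_CODE_ORDER), code).
import Mathlib
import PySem

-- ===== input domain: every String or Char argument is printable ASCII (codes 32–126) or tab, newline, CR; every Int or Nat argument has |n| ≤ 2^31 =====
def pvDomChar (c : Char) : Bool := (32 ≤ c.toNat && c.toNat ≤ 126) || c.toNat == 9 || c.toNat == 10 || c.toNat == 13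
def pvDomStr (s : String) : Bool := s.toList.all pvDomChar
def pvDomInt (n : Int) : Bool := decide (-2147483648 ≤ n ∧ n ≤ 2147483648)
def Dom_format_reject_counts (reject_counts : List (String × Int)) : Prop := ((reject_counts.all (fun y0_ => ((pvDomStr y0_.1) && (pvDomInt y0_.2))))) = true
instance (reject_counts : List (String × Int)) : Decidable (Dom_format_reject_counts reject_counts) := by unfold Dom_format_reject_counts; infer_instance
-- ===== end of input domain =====

-- B replaces A's two scans (priority pass + sorted-keys pass guarded by a 'seen' set) with one sort of
-- the positive codes under the composite key (rank-in-REJECT_CODE_ORDER or 17, code); objective: alternative decomposition.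

-- ===== PORT A =====
-- REJECT_CODE_ORDER (module constant)
def pvRCO : List String :=
  ["pb","mj","ct","ms","js","sb","ux","dv","sp","vc","ne","sr","tc","pl","np","md","dn"]

def format_reject_counts (reject_counts : List (String × Int)) : String :=
  let d : PySem.Dict String Int := PySem.Dict.ofList reject_counts
  if d.items = [] then "-"                                   -- if not reject_counts: return "-"
  else
    -- first loop: parts/seen over REJECT_CODE_ORDER
    let st := pvRCO.foldl
      (fun (st : List String × PySem.Set String) code =>
        let count := d.getD code 0
        if count ≤ 0 then st
        else (st.1 ++ [code ++ "=" ++ PySem.Int.toStr count], PySem.Set.add st.2 code))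
      ([], PySem.Set.empty)
    -- second loop: for code in sorted(reject_counts)
    let parts := (PySem.List.sorted d.keys (fun c => c)).foldl
      (fun parts code =>
        if PySem.Set.contains st.2 code then parts
        else
          let count := d.getD code 0   -- reject_counts[code]: code ∈ keys here, so getD is exact
          if count ≤ 0 then parts
          else parts ++ [code ++ "=" ++ PySem.Int.toStr count])
      st.1
    if parts = [] then "-" else PySem.Str.join " " parts

-- ===== PORT B =====
-- _RANK = {code: i for i, code in enumerate(REJECT_CODE_ORDER)}
def pvRank : PySem.Dict String Int :=
  PySem.Dict.ofList ((PySem.List.enumerate pvRCO).map (fun p => (p.2, p.1)))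

def format_reject_counts_alt (reject_counts : List (String × Int)) : String :=
  let d : PySem.Dict String Int := PySem.Dict.ofList reject_counts
  let n : Int := (pvRCO.length : Int)
  -- sorted((code for code, count in items if count > 0), key=lambda c: (_RANK.get(c, n), c));
  -- the Python tuple key is ported as the lexicographic key into Lex (Int × String)
  let chosen := PySem.List.sorted ((d.items.filter (fun p => 0 < p.2)).map (fun p => p.1))
      (fun code => toLex ((pvRank.getD code n, code) : Int × String))
  let parts := chosen.map (fun code => code ++ "=" ++ PySem.Int.toStr (d.getD code 0))
  if parts = [] then "-" else PySem.Str.join " " parts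

-- ===== PRECONDITION & SPEC =====
def Spec_format_reject_counts (reject_counts : List (String × Int)) (out : String) : Prop := out = format_reject_counts_alt reject_counts
instance (reject_counts : List (String × Int)) (out : String) : Decidable (Spec_format_reject_counts reject_counts out) := by unfold Spec_format_reject_counts; infer_instance

-- ===== CLAIM (what is proved, stated in full; the proofs are below) =====
def Claim_equal_format_reject_counts : Prop := ∀ (reject_counts : List (String × Int)), Dom_format_reject_counts reject_counts → Spec_format_reject_counts reject_counts (format_reject_counts reject_counts)

-- ===== LEMMAS AND PROOFS =====

theorem pv_rank_lt (c : String) (h : c ∈ pvRCO) : pvRank.getD c 17 < 17 := by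
  revert h; revert c; decide

theorem pv_rank_eq (c : String) (h : c ∉ pvRCO) : pvRank.getD c 17 = 17 := by
  apply PySem.Dict.getD_of_not_contains
  have hk : pvRank.keys = pvRCO := by decide
  rw [← Bool.not_eq_true]
  intro hc
  exact h (hk ▸ (PySem.Dict.contains_iff_mem_keys pvRank c).mp hc)

theorem pv_pos_mem (d : PySem.Dict String Int) (c : String) (h : 0 < d.getD c 0) : c ∈ d.keys := by
  by_contra hm
  have hc : d.contains c = false := by
    rw [← Bool.not_eq_true]; intro hc; exact hm ((PySem.Dict.contains_iff_mem_keys d c).mp hc)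
  rw [PySem.Dict.getD_of_not_contains d 0 hc] at h
  exact absurd h (by norm_num)

-- B's single sort, characterised: priority codes with positive count in REJECT_CODE_ORDER order,
-- then the remaining positive codes in sorted-key order.
theorem pv_chosen (d : PySem.Dict String Int) (hnd : d.keys.Nodup) :
    PySem.List.sorted ((d.items.filter (fun p => 0 < p.2)).map (fun p => p.1))
        (fun code => toLex ((pvRank.getD code 17, code) : Int × String))
    = pvRCO.filter (fun c => decide (0 < d.getD c 0))
      ++ (PySem.List.sorted d.keys (fun c => c)).filter
           (fun c => decide (c ∉ pvRCO ∧ 0 < d.getD c 0)) := by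
  set key : String → Lex (Int × String) := fun code => toLex ((pvRank.getD code 17, code) : Int × String) with hkey
  set sk := PySem.List.sorted d.keys (fun c => c) with hsk
  have hskperm : sk.Perm d.keys := PySem.List.sorted_perm d.keys (fun c => c) false
  have hsknd : sk.Nodup := hskperm.nodup_iff.mpr hnd
  set pB : String → Bool := fun c => decide (0 < d.getD c 0) with hpB
  set L1 := pvRCO.filter pB with hL1
  set L2 := sk.filter (fun c => decide (c ∉ pvRCO ∧ 0 < d.getD c 0)) with hL2
  have hP : (d.items.filter (fun p => 0 < p.2)).map (fun p => p.1) = d.keys.filter pB := by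
    rw [PySem.Dict.items_eq_map_keys d hnd 0, List.filter_map, List.map_map]
    simp [Function.comp_def, hpB]
  rw [hP]
  apply PySem.List.sorted_eq_of_perm_of_pairwise_lt
  · -- (L1 ++ L2) is a permutation of the positive keys
    have h2 : L1.Perm ((sk.filter pB).filter (fun c => decide (c ∈ pvRCO))) := by
      rw [(List.perm_ext_iff_of_nodup (List.Nodup.filter _ (by decide))
            (List.Nodup.filter _ (List.Nodup.filter _ hsknd)))]
      intro c
      simp only [List.mem_filter, hpB]
      constructor
      · rintro ⟨hin, hpos⟩
        exact ⟨⟨hskperm.mem_iff.mpr (pv_pos_mem d c (by simpa using hpos)), hpos⟩, by simpa using hin⟩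
      · rintro ⟨⟨_, hpos⟩, hin⟩
        exact ⟨by simpa using hin, hpos⟩
    have h3 : ((sk.filter pB).filter (fun c => decide (c ∈ pvRCO))
               ++ (sk.filter pB).filter (fun c => !decide (c ∈ pvRCO))).Perm (sk.filter pB) :=
      List.filter_append_perm _ _
    have h4 : (sk.filter pB).Perm (d.keys.filter pB) := hskperm.filter pB
    have h5 : L2 = (sk.filter pB).filter (fun c => !decide (c ∈ pvRCO)) := by
      rw [List.filter_filter, hL2]
      apply List.filter_congr
      intro c _
      simp [hpB]
    have e1 : (L1 ++ L2).Perm (sk.filter pB) := by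
      rw [h5]
      exact (h2.append_right _).trans h3
    exact e1.trans h4
  · -- (L1 ++ L2) is strictly increasing under the composite key
    rw [List.pairwise_append]
    refine ⟨?_, ?_, ?_⟩
    · have hr : pvRCO.Pairwise (fun a b => pvRank.getD a 17 < pvRank.getD b 17) := by decide
      refine (hr.sublist List.filter_sublist).imp ?_
      intro a b hab
      simp only [hkey]
      rw [Prod.Lex.lt_iff]
      simp only [ofLex_toLex]
      exact Or.inl hab
    · have hle : sk.Pairwise (fun a b => a ≤ b) := by
        simpa using PySem.List.sorted_pairwise d.keys (fun c => c)
      have hlt : sk.Pairwise (fun a b => a < b) :=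
        (hle.and hsknd).imp (fun h => lt_of_le_of_ne h.1 h.2)
      have hpw2 : L2.Pairwise (fun a b => a < b) := hlt.sublist List.filter_sublist
      refine hpw2.imp_of_mem ?_
      intro a b ha hb hab
      have hna : a ∉ pvRCO := by
        rw [hL2] at ha; simp only [List.mem_filter, decide_eq_true_eq] at ha; exact ha.2.1
      have hnb : b ∉ pvRCO := by
        rw [hL2] at hb; simp only [List.mem_filter, decide_eq_true_eq] at hb; exact hb.2.1
      simp only [hkey]
      rw [Prod.Lex.lt_iff]
      simp only [ofLex_toLex]
      exact Or.inr ⟨by rw [pv_rank_eq a hna, pv_rank_eq b hnb], hab⟩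
    · intro a ha b hb
      have hma : a ∈ pvRCO := (List.mem_filter.mp (hL1 ▸ ha)).1
      have hnb : b ∉ pvRCO := by
        rw [hL2] at hb; simp only [List.mem_filter, decide_eq_true_eq] at hb; exact hb.2.1
      simp only [hkey]
      rw [Prod.Lex.lt_iff]
      simp only [ofLex_toLex]
      exact Or.inl (by rw [pv_rank_eq b hnb]; exact pv_rank_lt a hma)

-- A's first loop: parts and seen, componentwise
theorem pv_fold1 (d : PySem.Dict String Int) (l : List String) :
    l.foldl
      (fun (st : List String × PySem.Set String) code =>
        if d.getD code 0 ≤ 0 then st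
        else (st.1 ++ [code ++ "=" ++ PySem.Int.toStr (d.getD code 0)], PySem.Set.add st.2 code))
      ([], PySem.Set.empty)
    = ((l.filter (fun c => decide ¬(d.getD c 0 ≤ 0))).map (fun c => c ++ "=" ++ PySem.Int.toStr (d.getD c 0)),
       PySem.Set.ofList (l.filter (fun c => decide ¬(d.getD c 0 ≤ 0)))) := by
  rw [PySem.List.foldl_congr_mem _ _
        (fun st code =>
          ((if ¬ (d.getD code 0 ≤ 0) then st.1 ++ [code ++ "=" ++ PySem.Int.toStr (d.getD code 0)] else st.1),
           (if ¬ (d.getD code 0 ≤ 0) then PySem.Set.add st.2 code else st.2))) _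
        (by
          intro acc x _
          by_cases h : d.getD x 0 ≤ 0 <;> simp [h])]
  rw [PySem.List.foldl_prod_mk
        (f := fun acc code => if ¬ (d.getD code 0 ≤ 0) then acc ++ [code ++ "=" ++ PySem.Int.toStr (d.getD code 0)] else acc)
        (g := fun acc code => if ¬ (d.getD code 0 ≤ 0) then PySem.Set.add acc code else acc)]
  rw [PySem.List.foldl_append_ite (p := fun c => ¬ (d.getD c 0 ≤ 0))]
  rw [PySem.List.foldl_ite_eq_foldl_filter (p := fun c => ¬ (d.getD c 0 ≤ 0)) (f := PySem.Set.add)]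
  rw [show (PySem.Set.empty : PySem.Set String) = [] from rfl, ← PySem.Set.ofList_eq_foldl]
  simp

-- A's second loop
theorem pv_fold2 (d : PySem.Dict String Int) (seen : PySem.Set String) (init : List String) (l : List String) :
    l.foldl
      (fun parts code =>
        if PySem.Set.contains seen code then parts
        else
          if d.getD code 0 ≤ 0 then parts
          else parts ++ [code ++ "=" ++ PySem.Int.toStr (d.getD code 0)]) init
    = init ++ (l.filter (fun c => decide (¬ (c ∈ seen) ∧ ¬ (d.getD c 0 ≤ 0)))).map
        (fun c => c ++ "=" ++ PySem.Int.toStr (d.getD c 0)) := by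
  rw [PySem.List.foldl_congr_mem _ _
        (fun parts code =>
          if (¬ (code ∈ seen) ∧ ¬ (d.getD code 0 ≤ 0)) then
            parts ++ [code ++ "=" ++ PySem.Int.toStr (d.getD code 0)]
          else parts) _
        (by
          intro acc x _
          by_cases h1 : x ∈ seen <;> by_cases h2 : d.getD x 0 ≤ 0 <;>
            simp [h1, h2])]
  rw [PySem.List.foldl_append_ite (p := fun c => ¬ (c ∈ seen) ∧ ¬ (d.getD c 0 ≤ 0))]

theorem pv_main (rc : List (String × Int)) :
    format_reject_counts rc = format_reject_counts_alt rc := by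
  simp only [format_reject_counts, format_reject_counts_alt]
  have hnd := PySem.Dict.nodup_keys_ofList rc
  generalize PySem.Dict.ofList rc = d at hnd ⊢
  by_cases hempty : d.items = []
  · simp [hempty, PySem.List.sorted_eq_nil_iff]
  · rw [if_neg hempty, pv_fold1 d pvRCO]
    rw [pv_fold2 d _ _ _]
    have hn : (pvRCO.length : Int) = 17 := by decide
    rw [hn, pv_chosen d hnd]
    have hf1 : pvRCO.filter (fun c => decide ¬(d.getD c 0 ≤ 0))
        = pvRCO.filter (fun c => decide (0 < d.getD c 0)) := by
      apply List.filter_congr; intro c _; rw [decide_eq_decide]; omega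
    have hf2 : (PySem.List.sorted d.keys (fun c => c)).filter
          (fun c => decide (¬ (c ∈ PySem.Set.ofList (pvRCO.filter (fun c => decide (0 < d.getD c 0)))) ∧ ¬ (d.getD c 0 ≤ 0)))
        = (PySem.List.sorted d.keys (fun c => c)).filter
          (fun c => decide (c ∉ pvRCO ∧ 0 < d.getD c 0)) := by
      apply List.filter_congr; intro c _; rw [decide_eq_decide]
      simp only [PySem.Set.mem_ofList, List.mem_filter, decide_eq_true_eq]
      constructor
      · rintro ⟨hns, hp⟩
        exact ⟨fun hin => hns ⟨hin, by omega⟩, by omega⟩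
      · rintro ⟨hni, hp⟩
        exact ⟨fun h => hni h.1, by omega⟩
    simp only [hf1, hf2, List.map_append]

-- ===== VERDICT (by name: the statement is the Claim_ definition above) =====
theorem format_reject_counts_spec : Claim_equal_format_reject_counts := by
  intro rc _
  unfold Spec_format_reject_counts
  exact pv_main rc
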